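-- pv_equiv track=rewrite | github.com/Veronica-Alfr/Restaurant-Orders | src/analyze_log.py | never_went_restaurant
-- ===== SOURCE A (Python) =====
-- def never_went_restaurant(restaurant, name_client):
--     all_days = set()
--     day_in_restaurant = set()
--
--     for client, food, day in restaurant:
--         all_days.add(day)
--         if client == name_client:
--             day_in_restaurant.add(day)
--
--     return all_days - day_in_restaurant
-- ===== SOURCE B (Python) =====
-- def never_went_restaurant(restaurant, name_client):
--     by_day = {}
--     for client, food, day in restaurant:
--         by_day.setdefault(day, set()).add(client)
--     return {day for day, clients in by_day.items() if name_client not in clients}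
-- ===== Notes on version B (the rewrite author's own statement) =====
-- stated objective: alternative
-- what changed: Replaces the two flat sets (all days, days the client was present) and their subtraction by a single group-by pass building a day -> set-of-clients index, whose items are then filtered for days whose client set misses name_client.
import Mathlib
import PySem

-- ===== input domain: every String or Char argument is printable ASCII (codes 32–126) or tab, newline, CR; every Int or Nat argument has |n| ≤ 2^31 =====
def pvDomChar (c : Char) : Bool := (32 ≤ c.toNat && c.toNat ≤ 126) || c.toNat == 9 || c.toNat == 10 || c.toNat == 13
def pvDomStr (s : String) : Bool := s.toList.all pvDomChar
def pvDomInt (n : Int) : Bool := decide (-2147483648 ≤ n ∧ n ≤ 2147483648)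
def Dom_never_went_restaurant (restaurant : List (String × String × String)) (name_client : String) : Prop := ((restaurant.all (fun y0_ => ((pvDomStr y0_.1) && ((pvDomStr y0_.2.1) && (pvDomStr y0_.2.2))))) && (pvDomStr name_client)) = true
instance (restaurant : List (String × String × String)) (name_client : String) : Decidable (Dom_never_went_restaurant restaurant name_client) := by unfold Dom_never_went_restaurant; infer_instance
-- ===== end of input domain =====

-- B replaces A's two flat sets and their subtraction by one day -> set-of-clients index filtered afterwards (objective: alternative, same cost).
-- Both return a Python set; the result list holds its distinct elements.

-- ===== PORT A =====
def never_went_restaurant (restaurant : List (String × String × String)) (name_client : String) : List String :=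
  let s := restaurant.foldl
    (fun (s : PySem.Set String × PySem.Set String) t =>
      (PySem.Set.add s.1 t.2.2,
       if t.1 == name_client then PySem.Set.add s.2 t.2.2 else s.2))
    (PySem.Set.empty, PySem.Set.empty)
  PySem.Set.diff s.1 s.2

-- ===== PORT B =====
def never_went_restaurant_alt (restaurant : List (String × String × String)) (name_client : String) : List String :=
  let by_day : PySem.Dict String (PySem.Set String) :=
    restaurant.foldl
      (fun d t => d.insert t.2.2 (PySem.Set.add (d.getD t.2.2 PySem.Set.empty) t.1))
      PySem.Dict.empty
  PySem.Set.ofList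
    ((by_day.items.filter (fun p => !(PySem.Set.contains p.2 name_client))).map Prod.fst)

-- ===== PRECONDITION & SPEC =====
def Spec_never_went_restaurant (restaurant : List (String × String × String)) (name_client : String) (out : List String) : Prop := out = never_went_restaurant_alt restaurant name_client
instance (restaurant : List (String × String × String)) (name_client : String) (out : List String) : Decidable (Spec_never_went_restaurant restaurant name_client out) := by unfold Spec_never_went_restaurant; infer_instance

-- ===== CLAIM (what is proved, stated in full; the proofs are below) =====
def Claim_equal_never_went_restaurant : Prop := ∀ (restaurant : List (String × String × String)) (name_client : String), Dom_never_went_restaurant restaurant name_client → Spec_never_went_restaurant restaurant name_client (never_went_restaurant restaurant name_client)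

-- ===== LEMMAS AND PROOFS =====

theorem pv_contains_add {α : Type} [BEq α] [LawfulBEq α] (s : PySem.Set α) (x y : α) :
    PySem.Set.contains (PySem.Set.add s x) y = (PySem.Set.contains s y || x == y) := by
  simp only [PySem.Set.add, PySem.Set.contains, List.contains_eq_mem]
  split
  · rename_i h
    by_cases hxy : x = y
    · subst hxy; simp [h]
    · simp [hxy]
  · by_cases hxy : x = y
    · subst hxy; simp
    · have hyx : ¬ y = x := fun h => hxy h.symm
      simp [hxy, hyx]

theorem pv_main (name_client : String) :
    ∀ (r : List (String × String × String)) (a1 a2 : PySem.Set String)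
      (d : PySem.Dict String (PySem.Set String)),
      d.keys = a1 → d.keys.Nodup →
      (∀ day, PySem.Set.contains (d.getD day PySem.Set.empty) name_client
              = PySem.Set.contains a2 day) →
      (let s := r.foldl
          (fun (s : PySem.Set String × PySem.Set String) t =>
            (PySem.Set.add s.1 t.2.2,
             if t.1 == name_client then PySem.Set.add s.2 t.2.2 else s.2)) (a1, a2)
       PySem.Set.diff s.1 s.2)
      = PySem.Set.ofList
          (((r.foldl
              (fun d t => d.insert t.2.2 (PySem.Set.add (d.getD t.2.2 PySem.Set.empty) t.1)) d).items.filter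
              (fun p => !(PySem.Set.contains p.2 name_client))).map Prod.fst) := by
  intro r
  induction r with
  | nil =>
    intro a1 a2 d hk hnd hinv
    simp only [List.foldl_nil]
    rw [PySem.Dict.items_eq_map_keys d hnd PySem.Set.empty]
    rw [List.filter_map, List.map_map]
    have h1 : (Prod.fst ∘ fun k => (k, d.getD k PySem.Set.empty)) = id := rfl
    rw [h1, List.map_id]
    have h2 : (d.keys.filter
        ((fun p => !(PySem.Set.contains p.2 name_client)) ∘ fun k => (k, d.getD k PySem.Set.empty)))
        = d.keys.filter (fun k => !(PySem.Set.contains a2 k)) := by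
      apply List.filter_congr
      intro k _
      simp only [Function.comp]
      rw [hinv k]
    rw [h2, PySem.Set.ofList_eq_self_of_nodup _ (List.Nodup.filter _ hnd), hk]
    rfl
  | cons t r ih =>
    intro a1 a2 d hk hnd hinv
    simp only [List.foldl_cons]
    apply ih
    · -- keys of the inserted dict = Set.add a1 t.2.2
      by_cases hc : d.contains t.2.2 = true
      · rw [PySem.Dict.keys_insert_of_contains _ _ hc, hk]
        have hmem : t.2.2 ∈ a1 := by
          rw [← hk]; rw [PySem.Dict.contains_eq_decide_mem_keys] at hc
          exact of_decide_eq_true hc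
        simp [PySem.Set.add, PySem.Set.contains, List.contains_eq_mem, hmem]
      · rw [PySem.Dict.keys_insert_of_not_contains _ _ (by simpa using hc), hk]
        have hmem : t.2.2 ∉ a1 := by
          rw [← hk]; rw [PySem.Dict.contains_eq_decide_mem_keys] at hc
          simpa using hc
        simp [PySem.Set.add, PySem.Set.contains, List.contains_eq_mem, hmem]
    · exact PySem.Dict.nodup_keys_insert _ _ _ hnd
    · intro day
      rw [PySem.Dict.getD_insert]
      by_cases hd : day = t.2.2
      · subst hd
        rw [if_pos (by trivial), pv_contains_add]
        by_cases hcl : (t.1 == name_client) = true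
        · rw [if_pos hcl, hcl, Bool.or_true, pv_contains_add]
          simp
        · rw [if_neg hcl]
          simp only [Bool.not_eq_true] at hcl
          rw [hcl, Bool.or_false, hinv]
      · rw [if_neg hd, hinv day]
        by_cases hcl : (t.1 == name_client) = true
        · rw [if_pos hcl, pv_contains_add]
          have hne : (t.2.2 == day) = false := by
            simp only [beq_eq_false_iff_ne, ne_eq]
            exact fun h => hd h.symm
          rw [hne, Bool.or_false]
        · rw [if_neg hcl]

-- ===== VERDICT (by name: the statement is the Claim_ definition above) =====
theorem never_went_restaurant_spec : Claim_equal_never_went_restaurant := by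
  intro restaurant name_client _
  unfold Spec_never_went_restaurant never_went_restaurant never_went_restaurant_alt
  exact pv_main name_client restaurant PySem.Set.empty PySem.Set.empty PySem.Dict.empty
    rfl List.nodup_nil (fun day => rfl)
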